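-- pv_equiv track=rewrite | github.com/dan47bennett/google-foobar | bomb-baby.py | numberOfGenerations
-- ===== SOURCE A (Python) =====
-- def numberOfGenerations(x, y):
--     generations = 0
--     while x != 1 or y != 1:
--
--         if x == y or x < 1 or y < 1:
--             return 'impossible'
--
--         if x > 2 * y:
--             estimatedGenerations = int(x / y)
--             generations += estimatedGenerations - 1
--             x = x - ((estimatedGenerations - 1) * y)
--
--         elif y > 2 * x:
--             estimatedGenerations = int(y / x)
--             generations += estimatedGenerations - 1
--             y = y - ((estimatedGenerations - 1) * x)
--
--         elif x > y:
--             generations += 1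
--             x = x - y
--
--         else:
--             generations += 1
--             y = y - x
--
--     return str(generations)
-- ===== SOURCE B (Python) =====
-- def _euclid(a, b):
--     # returns (gcd(a, b), sum of the continued-fraction quotients of a/b)
--     if b == 0:
--         return a, 0
--     g, s = _euclid(b, a % b)
--     return g, s + a // b
--
-- def numberOfGenerations(x, y):
--     if x < 1 or y < 1:
--         return 'impossible'
--     g, s = _euclid(max(x, y), min(x, y))
--     return str(s - 1) if g == 1 else 'impossible'
-- ===== Notes on version B (the rewrite author's own statement) =====
-- stated objective: alternative
-- what changed: A simulates the reverse bomb process with a stateful subtraction loop (partial batching via int(x/y)-1 plus single subtractions, feasibility checked inside the loop); B never simulates: it recursively computes the pair (gcd, sum of continued-fraction quotients) of (max,min) in one unconditional Euclidean recursion and returns the closed form str(sum-1) when the gcd is 1, else 'impossible'.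
import Mathlib
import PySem

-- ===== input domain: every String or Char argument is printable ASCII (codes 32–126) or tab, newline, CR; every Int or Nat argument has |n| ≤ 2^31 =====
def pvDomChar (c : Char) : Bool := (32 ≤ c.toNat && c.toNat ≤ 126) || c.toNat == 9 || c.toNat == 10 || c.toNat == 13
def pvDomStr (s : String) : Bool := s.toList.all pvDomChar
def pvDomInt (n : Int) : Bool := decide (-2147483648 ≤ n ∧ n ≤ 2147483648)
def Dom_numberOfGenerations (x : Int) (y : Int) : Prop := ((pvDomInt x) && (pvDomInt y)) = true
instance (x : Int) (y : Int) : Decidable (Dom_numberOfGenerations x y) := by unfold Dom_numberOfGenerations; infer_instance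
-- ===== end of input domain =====

-- B replaces A's reverse-process simulation (a stateful subtraction loop with partial batching and
-- in-loop feasibility checks) by a non-simulating computation: one Euclidean recursion returning
-- (gcd, sum of continued-fraction quotients) and the closed form str(sum - 1) iff gcd = 1
-- (objective: alternative).

-- ===== PORT A =====
-- Termination helper for A's loop, cited in `decreasing_by` below: in the `x > 2*y` branch the
-- new x equals y + x % y, which is positive and strictly smaller than x.
theorem pvA_batch_bounds (x y : Int) (hy : 0 < y) (hx : 2 * y < x) :
    2 ≤ PySem.Int.truncdiv x y ∧ x - (PySem.Int.truncdiv x y - 1) * y = y + x % y := by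
  have hx0 : 0 ≤ x := by omega
  have ht : PySem.Int.truncdiv x y = x / y := by
    simp only [PySem.Int.truncdiv]; exact Int.tdiv_eq_ediv_of_nonneg hx0
  have hdm := Int.mul_ediv_add_emod x y
  have h2 : 2 ≤ x / y := by
    rw [Int.le_ediv_iff_mul_le hy]; omega
  constructor
  · omega
  · rw [ht]; nlinarith [Int.mul_ediv_add_emod x y]

-- A's loop body, transliterated. `int(x / y)` is ported as PySem.Int.truncdiv, which is exactly
-- int(x / y) for |x|,|y| < 2^53 — true throughout on Dom (|x|,|y| ≤ 2^31 and they only shrink).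
def numberOfGenerationsLoop (x : Int) (y : Int) (generations : Int) : String :=
  if x ≠ 1 ∨ y ≠ 1 then
    if x = y ∨ x < 1 ∨ y < 1 then "impossible"
    else if x > 2 * y then
      let estimatedGenerations := PySem.Int.truncdiv x y
      numberOfGenerationsLoop (x - (estimatedGenerations - 1) * y) y
        (generations + (estimatedGenerations - 1))
    else if y > 2 * x then
      let estimatedGenerations := PySem.Int.truncdiv y x
      numberOfGenerationsLoop x (y - (estimatedGenerations - 1) * x)
        (generations + (estimatedGenerations - 1))
    else if x > y then numberOfGenerationsLoop (x - y) y (generations + 1)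
    else numberOfGenerationsLoop x (y - x) (generations + 1)
  else PySem.Int.toStr generations
termination_by (x + y).toNat
decreasing_by
  · have hy : 0 < y := by omega
    have := pvA_batch_bounds x y hy (by omega)
    have := Int.emod_nonneg x (by omega : y ≠ 0)
    have := Int.emod_lt_of_pos x hy
    omega
  · have hx : 0 < x := by omega
    have := pvA_batch_bounds y x hx (by omega)
    have := Int.emod_nonneg y (by omega : x ≠ 0)
    have := Int.emod_lt_of_pos y hx
    omega
  · omega
  · omega

def numberOfGenerations (x : Int) (y : Int) : String :=
  numberOfGenerationsLoop x y 0

-- ===== PORT B =====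
-- _euclid(a, b): (gcd(a, b), sum of the continued-fraction quotients of a/b), recursively.
def pvEuclid (a : Int) (b : Int) : Int × Int :=
  if b = 0 then (a, 0)
  else
    let p := pvEuclid b (PySem.Int.mod a b)
    (p.1, p.2 + PySem.Int.floordiv a b)
termination_by b.natAbs
decreasing_by
  rename_i hb
  rcases lt_or_gt_of_ne (fun h => hb h) with h | h
  · have := PySem.Int.mod_neg_bounds a h
    omega
  · have := PySem.Int.mod_nonneg a h
    have := PySem.Int.mod_lt a h
    omega

def numberOfGenerations_alt (x : Int) (y : Int) : String :=
  if x < 1 ∨ y < 1 then "impossible"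
  else
    let p := pvEuclid (max x y) (min x y)
    if p.1 = 1 then PySem.Int.toStr (p.2 - 1) else "impossible"

-- ===== PRECONDITION & SPEC =====
def Spec_numberOfGenerations (x : Int) (y : Int) (out : String) : Prop := out = numberOfGenerations_alt x y
instance (x : Int) (y : Int) (out : String) : Decidable (Spec_numberOfGenerations x y out) := by unfold Spec_numberOfGenerations; infer_instance

-- ===== CLAIM (what is proved, stated in full; the proofs are below) =====
def Claim_equal_numberOfGenerations : Prop := ∀ (x : Int) (y : Int), Dom_numberOfGenerations x y → Spec_numberOfGenerations x y (numberOfGenerations x y)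

-- ===== LEMMAS AND PROOFS =====

-- Proof-only bridge: a division-based step loop, intermediate between A's subtraction loop and
-- B's recursion. We prove A's loop = bridgeLoop, then bridgeLoop = B's closed form.
def bridgeLoop (x : Int) (y : Int) (count : Int) : String :=
  if x = 1 ∧ y = 1 then PySem.Int.toStr count
  else if x < 1 ∨ y < 1 ∨ x = y then "impossible"
  else if x = 1 then PySem.Int.toStr (count + y - 1)
  else if y = 1 then PySem.Int.toStr (count + x - 1)
  else if x > y then
    bridgeLoop (PySem.Int.mod x y) y (count + PySem.Int.floordiv x y)
  else
    bridgeLoop x (PySem.Int.mod y x) (count + PySem.Int.floordiv y x)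
termination_by (x + y).toNat
decreasing_by
  · have hy : 0 < y := by omega
    have := PySem.Int.mod_nonneg x hy
    have := PySem.Int.mod_lt x hy
    omega
  · have hx : 0 < x := by omega
    have := PySem.Int.mod_nonneg y hx
    have := PySem.Int.mod_lt y hx
    omega

-- int(x / y) ported as truncdiv equals floor division on nonnegative arguments
theorem pvTruncEq (x y : Int) (hx : 0 ≤ x) (hy : 0 < y) :
    PySem.Int.truncdiv x y = PySem.Int.floordiv x y := by
  simp only [PySem.Int.truncdiv]
  rw [PySem.Int.floordiv_eq_ediv_of_pos hy]
  exact Int.tdiv_eq_ediv_of_nonneg hx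

-- one-step evaluation lemmas for A's loop
theorem aLoop_one_one (g : Int) : numberOfGenerationsLoop 1 1 g = PySem.Int.toStr g := by
  rw [numberOfGenerationsLoop]; simp

theorem aLoop_imp (x y g : Int) (h1 : x ≠ 1 ∨ y ≠ 1) (h2 : x = y ∨ x < 1 ∨ y < 1) :
    numberOfGenerationsLoop x y g = "impossible" := by
  rw [numberOfGenerationsLoop, if_pos h1, if_pos h2]

theorem aLoop_batch_x (x y g : Int) (hy : 1 ≤ y) (hx : 2 * y < x) :
    numberOfGenerationsLoop x y g =
      numberOfGenerationsLoop (x - (PySem.Int.truncdiv x y - 1) * y) y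
        (g + (PySem.Int.truncdiv x y - 1)) := by
  rw [numberOfGenerationsLoop, if_pos (by omega), if_neg (by omega), if_pos (by omega)]

theorem aLoop_batch_y (x y g : Int) (hx : 1 ≤ x) (hy : 2 * x < y) :
    numberOfGenerationsLoop x y g =
      numberOfGenerationsLoop x (y - (PySem.Int.truncdiv y x - 1) * x)
        (g + (PySem.Int.truncdiv y x - 1)) := by
  rw [numberOfGenerationsLoop, if_pos (by omega), if_neg (by omega), if_neg (by omega),
      if_pos (by omega)]

theorem aLoop_sub_x (x y g : Int) (hy : 1 ≤ y) (hxy : y < x) (hle : x ≤ 2 * y) :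
    numberOfGenerationsLoop x y g = numberOfGenerationsLoop (x - y) y (g + 1) := by
  rw [numberOfGenerationsLoop, if_pos (by omega), if_neg (by omega), if_neg (by omega),
      if_neg (by omega), if_pos (by omega)]

theorem aLoop_sub_y (x y g : Int) (hx : 1 ≤ x) (hxy : x < y) (hle : y ≤ 2 * x) :
    numberOfGenerationsLoop x y g = numberOfGenerationsLoop x (y - x) (g + 1) := by
  rw [numberOfGenerationsLoop, if_pos (by omega), if_neg (by omega), if_neg (by omega),
      if_neg (by omega), if_neg (by omega)]

-- one-step evaluation lemmas for the bridge loop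
theorem bLoop_one_one (c : Int) : bridgeLoop 1 1 c = PySem.Int.toStr c := by
  rw [bridgeLoop]; simp

theorem bLoop_imp (x y c : Int) (h1 : ¬ (x = 1 ∧ y = 1)) (h2 : x < 1 ∨ y < 1 ∨ x = y) :
    bridgeLoop x y c = "impossible" := by
  rw [bridgeLoop, if_neg h1, if_pos h2]

theorem bLoop_x1 (y c : Int) (hy : 2 ≤ y) :
    bridgeLoop 1 y c = PySem.Int.toStr (c + y - 1) := by
  rw [bridgeLoop, if_neg (by omega), if_neg (by omega), if_pos rfl]

theorem bLoop_y1 (x c : Int) (hx : 2 ≤ x) :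
    bridgeLoop x 1 c = PySem.Int.toStr (c + x - 1) := by
  rw [bridgeLoop, if_neg (by omega), if_neg (by omega), if_neg (by omega),
      if_pos rfl]

theorem bLoop_go_x (x y c : Int) (hy : 2 ≤ y) (hxy : y < x) :
    bridgeLoop x y c =
      bridgeLoop (PySem.Int.mod x y) y (c + PySem.Int.floordiv x y) := by
  rw [bridgeLoop, if_neg (by omega), if_neg (by omega), if_neg (by omega),
      if_neg (by omega), if_pos (by omega)]

theorem bLoop_go_y (x y c : Int) (hx : 2 ≤ x) (hxy : x < y) :
    bridgeLoop x y c =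
      bridgeLoop x (PySem.Int.mod y x) (c + PySem.Int.floordiv y x) := by
  rw [bridgeLoop, if_neg (by omega), if_neg (by omega), if_neg (by omega),
      if_neg (by omega), if_neg (by omega)]

-- A's loop and the bridge loop agree on every state, by strong induction on x + y
theorem loops_eq (n : Nat) : ∀ (x y g : Int), (x + y).toNat < n →
    numberOfGenerationsLoop x y g = bridgeLoop x y g := by
  induction n with
  | zero => intro x y g h; omega
  | succ n ih =>
    intro x y g h
    by_cases h11 : x = 1 ∧ y = 1
    · obtain ⟨rfl, rfl⟩ := h11; rw [aLoop_one_one, bLoop_one_one]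
    by_cases himp : x = y ∨ x < 1 ∨ y < 1
    · rw [aLoop_imp x y g (by omega) himp, bLoop_imp x y g h11 (by omega)]
    by_cases hx1 : x = 1
    · -- x = 1, y ≥ 2: A batches (or subtracts once); the bridge returns the closed form
      subst hx1
      rw [bLoop_x1 y g (by omega)]
      by_cases hy2 : 2 < y
      · rw [aLoop_batch_y 1 y g (by omega) (by omega), pvTruncEq y 1 (by omega) (by omega)]
        have hq : PySem.Int.floordiv y 1 = y :=
          (PySem.Int.floordiv_eq_iff_of_pos (by omega)).mpr ⟨by omega, by omega⟩
        rw [hq, show y - (y - 1) * 1 = 1 by ring, aLoop_one_one]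
        congr 1; omega
      · have hy : y = 2 := by omega
        subst hy
        rw [aLoop_sub_y 1 2 g (by omega) (by omega) (by omega),
            show (2:Int) - 1 = 1 from rfl, aLoop_one_one]
        congr 1; omega
    by_cases hy1 : y = 1
    · subst hy1
      rw [bLoop_y1 x g (by omega)]
      by_cases hx2 : 2 < x
      · rw [aLoop_batch_x x 1 g (by omega) (by omega), pvTruncEq x 1 (by omega) (by omega)]
        have hq : PySem.Int.floordiv x 1 = x :=
          (PySem.Int.floordiv_eq_iff_of_pos (by omega)).mpr ⟨by omega, by omega⟩
        rw [hq, show x - (x - 1) * 1 = 1 by ring, aLoop_one_one]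
        congr 1; omega
      · have hx : x = 2 := by omega
        subst hx
        rw [aLoop_sub_x 2 1 g (by omega) (by omega) (by omega),
            show (2:Int) - 1 = 1 from rfl, aLoop_one_one]
        congr 1; omega
    -- now x, y ≥ 2 and x ≠ y
    by_cases hgt : y < x
    · have hdm := PySem.Int.floordiv_mul_add_mod x y
      have hr0 := PySem.Int.mod_nonneg x (show (0:Int) < y by omega)
      have hr1 := PySem.Int.mod_lt x (show (0:Int) < y by omega)
      rw [bLoop_go_x x y g (by omega) hgt]
      by_cases hb : 2 * y < x
      · have h2q : 2 ≤ PySem.Int.floordiv x y :=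
          (PySem.Int.le_floordiv_iff_mul_le (by omega)).mpr (by omega)
        rw [aLoop_batch_x x y g (by omega) hb, pvTruncEq x y (by omega) (by omega),
            show x - (PySem.Int.floordiv x y - 1) * y = y + PySem.Int.mod x y by
              linear_combination -hdm]
        by_cases hr : PySem.Int.mod x y = 0
        · rw [hr, show y + (0:Int) = y by ring,
              aLoop_imp _ _ _ (by omega) (by omega), bLoop_imp _ _ _ (by omega) (by omega)]
        · have hxgt : y + PySem.Int.mod x y < x := by nlinarith
          rw [ih _ _ _ (by omega), bLoop_go_x _ _ _ (by omega) (by omega)]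
          have hq1 : PySem.Int.floordiv (y + PySem.Int.mod x y) y = 1 :=
            (PySem.Int.floordiv_eq_iff_of_pos (by omega)).mpr ⟨by omega, by omega⟩
          have hm1 : PySem.Int.mod (y + PySem.Int.mod x y) y = PySem.Int.mod x y := by
            have := PySem.Int.floordiv_mul_add_mod (y + PySem.Int.mod x y) y
            rw [hq1] at this; omega
          rw [hq1, hm1]
          congr 1; omega
      · by_cases heq : x = 2 * y
        · have hq2 : PySem.Int.floordiv x y = 2 :=
            (PySem.Int.floordiv_eq_iff_of_pos (by omega)).mpr ⟨by omega, by omega⟩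
          have hm2 : PySem.Int.mod x y = 0 := by rw [hq2] at hdm; omega
          rw [aLoop_sub_x x y g (by omega) hgt (by omega), show x - y = y by omega,
              aLoop_imp _ _ _ (by omega) (by omega), hm2,
              bLoop_imp _ _ _ (by omega) (by omega)]
        · have hq1 : PySem.Int.floordiv x y = 1 :=
            (PySem.Int.floordiv_eq_iff_of_pos (by omega)).mpr ⟨by omega, by omega⟩
          have hm1 : PySem.Int.mod x y = x - y := by rw [hq1] at hdm; omega
          rw [aLoop_sub_x x y g (by omega) hgt (by omega), hq1, hm1]
          exact ih _ _ _ (by omega)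
    · have hlt : x < y := by omega
      have hdm := PySem.Int.floordiv_mul_add_mod y x
      have hr0 := PySem.Int.mod_nonneg y (show (0:Int) < x by omega)
      have hr1 := PySem.Int.mod_lt y (show (0:Int) < x by omega)
      rw [bLoop_go_y x y g (by omega) hlt]
      by_cases hb : 2 * x < y
      · have h2q : 2 ≤ PySem.Int.floordiv y x :=
          (PySem.Int.le_floordiv_iff_mul_le (by omega)).mpr (by omega)
        rw [aLoop_batch_y x y g (by omega) hb, pvTruncEq y x (by omega) (by omega),
            show y - (PySem.Int.floordiv y x - 1) * x = x + PySem.Int.mod y x by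
              linear_combination -hdm]
        by_cases hr : PySem.Int.mod y x = 0
        · rw [hr, show x + (0:Int) = x by ring,
              aLoop_imp _ _ _ (by omega) (by omega), bLoop_imp _ _ _ (by omega) (by omega)]
        · have hygt : x + PySem.Int.mod y x < y := by nlinarith
          rw [ih _ _ _ (by omega), bLoop_go_y _ _ _ (by omega) (by omega)]
          have hq1 : PySem.Int.floordiv (x + PySem.Int.mod y x) x = 1 :=
            (PySem.Int.floordiv_eq_iff_of_pos (by omega)).mpr ⟨by omega, by omega⟩
          have hm1 : PySem.Int.mod (x + PySem.Int.mod y x) x = PySem.Int.mod y x := by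
            have := PySem.Int.floordiv_mul_add_mod (x + PySem.Int.mod y x) x
            rw [hq1] at this; omega
          rw [hq1, hm1]
          congr 1; omega
      · by_cases heq : y = 2 * x
        · have hq2 : PySem.Int.floordiv y x = 2 :=
            (PySem.Int.floordiv_eq_iff_of_pos (by omega)).mpr ⟨by omega, by omega⟩
          have hm2 : PySem.Int.mod y x = 0 := by rw [hq2] at hdm; omega
          rw [aLoop_sub_y x y g (by omega) hlt (by omega), show y - x = x by omega,
              aLoop_imp _ _ _ (by omega) (by omega), hm2,
              bLoop_imp _ _ _ (by omega) (by omega)]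
        · have hq1 : PySem.Int.floordiv y x = 1 :=
            (PySem.Int.floordiv_eq_iff_of_pos (by omega)).mpr ⟨by omega, by omega⟩
          have hm1 : PySem.Int.mod y x = y - x := by rw [hq1] at hdm; omega
          rw [aLoop_sub_y x y g (by omega) hlt (by omega), hq1, hm1]
          exact ih _ _ _ (by omega)

-- pvEuclid evaluation lemmas
theorem pvEuclid_zero (a : Int) : pvEuclid a 0 = (a, 0) := by
  rw [pvEuclid]; simp

theorem pvEuclid_step (a b : Int) (hb : b ≠ 0) :
    pvEuclid a b = ((pvEuclid b (PySem.Int.mod a b)).1,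
                    (pvEuclid b (PySem.Int.mod a b)).2 + PySem.Int.floordiv a b) := by
  rw [pvEuclid, if_neg hb]

theorem pvMod_self (x : Int) : PySem.Int.mod x x = 0 := by
  exact (PySem.Int.mod_eq_zero_iff_dvd x x).mpr dvd_rfl

theorem pvMod_one (y : Int) : PySem.Int.mod y 1 = 0 := by
  exact (PySem.Int.mod_eq_zero_iff_dvd y 1).mpr (one_dvd y)

theorem pvFloordiv_one (y : Int) : PySem.Int.floordiv y 1 = y := by
  have := PySem.Int.floordiv_mul_add_mod y 1
  have := pvMod_one y
  omega

theorem pvEuclid_self (x : Int) (hx : 1 ≤ x) : pvEuclid x x = (x, 1) := by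
  have h1 : PySem.Int.floordiv x x = 1 :=
    (PySem.Int.floordiv_eq_iff_of_pos (by omega)).mpr ⟨by omega, by omega⟩
  rw [pvEuclid_step x x (by omega), pvMod_self x, pvEuclid_zero, h1]; simp

theorem pvEuclid_one (y : Int) : pvEuclid y 1 = (1, y) := by
  rw [pvEuclid_step y 1 (by omega), pvMod_one, pvEuclid_zero, pvFloordiv_one]; simp

-- the bridge loop computes B's closed form, by strong induction on x + y
theorem bridge_eq (n : Nat) : ∀ (x y c : Int), (x + y).toNat < n →
    bridgeLoop x y c =
      (if 1 ≤ x ∧ 1 ≤ y ∧ (pvEuclid (max x y) (min x y)).1 = 1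
       then PySem.Int.toStr (c + (pvEuclid (max x y) (min x y)).2 - 1)
       else "impossible") := by
  induction n with
  | zero => intro x y c h; omega
  | succ n ih =>
    intro x y c h
    by_cases h11 : x = 1 ∧ y = 1
    · obtain ⟨rfl, rfl⟩ := h11
      rw [bLoop_one_one, max_self, min_self, pvEuclid_one, if_pos ⟨by omega, by omega, rfl⟩]
      congr 1; ring
    by_cases hneg : x < 1 ∨ y < 1
    · rw [bLoop_imp x y c h11 (by omega), if_neg (by omega)]
    by_cases heq : x = y
    · -- x = y ≥ 2: gcd = x ≠ 1
      subst heq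
      rw [bLoop_imp x x c h11 (by omega), max_self, min_self, pvEuclid_self x (by omega),
          if_neg (by simp; omega)]
    by_cases hx1 : x = 1
    · subst hx1
      have hy2 : 2 ≤ y := by omega
      rw [bLoop_x1 y c hy2, show max 1 y = y by omega, show min 1 y = 1 by omega,
          pvEuclid_one, if_pos ⟨by omega, by omega, rfl⟩]
    by_cases hy1 : y = 1
    · subst hy1
      have hx2 : 2 ≤ x := by omega
      rw [bLoop_y1 x c hx2, show max x 1 = x by omega, show min x 1 = 1 by omega,
          pvEuclid_one, if_pos ⟨by omega, by omega, rfl⟩]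
    -- now x, y ≥ 2, x ≠ y
    by_cases hgt : y < x
    · have hr0 := PySem.Int.mod_nonneg x (show (0:Int) < y by omega)
      have hr1 := PySem.Int.mod_lt x (show (0:Int) < y by omega)
      rw [bLoop_go_x x y c (by omega) hgt, show max x y = x by omega, show min x y = y by omega,
          pvEuclid_step x y (by omega)]
      by_cases hr : PySem.Int.mod x y = 0
      · rw [hr] at *
        rw [bLoop_imp _ _ _ (by omega) (by omega), pvEuclid_zero,
            if_neg (by simp; omega)]
      · rw [ih (PySem.Int.mod x y) y _ (by omega), show max (PySem.Int.mod x y) y = y by omega,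
            show min (PySem.Int.mod x y) y = PySem.Int.mod x y by omega]
        by_cases hg : (pvEuclid y (PySem.Int.mod x y)).1 = 1
        · rw [if_pos ⟨by omega, by omega, hg⟩, if_pos ⟨by omega, by omega, hg⟩]
          congr 1; ring
        · rw [if_neg (by simp; omega), if_neg (by simp; omega)]
    · have hlt : x < y := by omega
      have hr0 := PySem.Int.mod_nonneg y (show (0:Int) < x by omega)
      have hr1 := PySem.Int.mod_lt y (show (0:Int) < x by omega)
      rw [bLoop_go_y x y c (by omega) hlt, show max x y = y by omega, show min x y = x by omega,
          pvEuclid_step y x (by omega)]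
      by_cases hr : PySem.Int.mod y x = 0
      · rw [hr] at *
        rw [bLoop_imp _ _ _ (by omega) (by omega), pvEuclid_zero,
            if_neg (by simp; omega)]
      · rw [ih x (PySem.Int.mod y x) _ (by omega), show max x (PySem.Int.mod y x) = x by omega,
            show min x (PySem.Int.mod y x) = PySem.Int.mod y x by omega]
        by_cases hg : (pvEuclid x (PySem.Int.mod y x)).1 = 1
        · rw [if_pos ⟨by omega, by omega, hg⟩, if_pos ⟨by omega, by omega, hg⟩]
          congr 1; ring
        · rw [if_neg (by simp; omega), if_neg (by simp; omega)]

-- ===== VERDICT (by name: the statement is the Claim_ definition above) =====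
theorem numberOfGenerations_spec : Claim_equal_numberOfGenerations := by
  intro x y _
  unfold Spec_numberOfGenerations numberOfGenerations numberOfGenerations_alt
  rw [loops_eq ((x + y).toNat + 1) x y 0 (Nat.lt_succ_self _),
      bridge_eq ((x + y).toNat + 1) x y 0 (Nat.lt_succ_self _)]
  by_cases hneg : x < 1 ∨ y < 1
  · rw [if_pos hneg, if_neg (by omega)]
  · rw [if_neg hneg]
    by_cases hg : (pvEuclid (max x y) (min x y)).1 = 1
    · rw [if_pos hg, if_pos ⟨by omega, by omega, hg⟩]
      congr 1; ring
    · rw [if_neg hg, if_neg (by simp; omega)]
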